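-- pv_equiv track=rewrite | github.com/AkashSingh215/Plivo_ML_assignment_2023AIY7582 | src/rules.py | collapse_spelled_letters
-- ===== SOURCE A (Python) =====
-- def collapse_spelled_letters(s: str, min_run: int = 2, max_run: int = 12) -> str:
--     """
--     Collapse contiguous runs of single-letter tokens into a single token.
--     Example: "g m a i l" -> "gmail"
--     """
--     tokens = s.split()
--     out = []
--     i = 0
--     N = len(tokens)
--     while i < N:
--         if len(tokens[i]) == 1:
--             j = i
--             while j < N and len(tokens[j]) == 1 and (j - i) < max_run:
--                 j += 1
--             run_len = j - i
--             if run_len >= min_run: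
--                 out.append(''.join(tokens[i:j]))
--                 i = j
--                 continue
--         out.append(tokens[i])
--         i += 1
--     return ' '.join(out)
-- ===== SOURCE B (Python) =====
-- def collapse_spelled_letters(s: str, min_run: int = 2, max_run: int = 12) -> str:
--     tokens = s.split()
--     if max_run <= 0:
--         return ' '.join(tokens)
--     # phase 1: group consecutive tokens by whether they are single-character
--     groups = []
--     for t in tokens:
--         single = len(t) == 1
--         if groups and groups[-1][0] == single:
--             groups[-1][1].append(t)
--         else:
--             groups.append([single, [t]])
--     # phase 2: collapse each single-character group chunkwise
--     out = []
--     for single, grp in groups: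
--         if single:
--             for k in range(0, len(grp), max_run):
--                 chunk = grp[k:k + max_run]
--                 if len(chunk) >= min_run:
--                     out.append(''.join(chunk))
--                 else:
--                     out.extend(chunk)
--         else:
--             out.extend(grp)
--     return ' '.join(out)
-- ===== Notes on version B (the rewrite author's own statement) =====
-- stated objective: alternative
-- what changed: Replaces A's two-pointer index-jumping while-loop scan by a group-then-chunk decomposition: one pass groups consecutive tokens by whether they are single-character, then each single-character group is sliced into chunks of max_run tokens which are joined or emitted individually.
import Mathlib
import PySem

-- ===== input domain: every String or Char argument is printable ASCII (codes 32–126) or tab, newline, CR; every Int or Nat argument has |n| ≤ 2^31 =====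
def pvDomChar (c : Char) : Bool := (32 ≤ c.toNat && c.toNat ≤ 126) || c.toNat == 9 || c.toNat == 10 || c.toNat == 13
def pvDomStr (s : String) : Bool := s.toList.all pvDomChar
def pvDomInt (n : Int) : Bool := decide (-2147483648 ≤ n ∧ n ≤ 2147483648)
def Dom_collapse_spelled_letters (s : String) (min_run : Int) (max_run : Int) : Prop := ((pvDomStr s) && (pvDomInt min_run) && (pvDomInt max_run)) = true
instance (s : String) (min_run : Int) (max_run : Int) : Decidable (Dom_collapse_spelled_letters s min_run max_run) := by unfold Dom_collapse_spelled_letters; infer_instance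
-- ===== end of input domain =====

-- B restructures A's two-pointer scan into group-by-singleness followed by chunking; same return value on Pre_.

-- ===== PORT A =====
-- inner 'while j < N and len(tokens[j]) == 1 and (j - i) < max_run: j += 1'
def pvAInner (tokens : List String) (N i max_run : Int) (j : Int) : Int :=
  if _h : j < N ∧ PySem.Str.len ((PySem.List.pyGet? tokens j).getD "") = 1 ∧ j - i < max_run then
    pvAInner tokens N i max_run (j + 1)
  else j
termination_by (N - j).toNat
decreasing_by omega

-- outer while loop; fuel only makes the recursion structural (Python A diverges when
-- min_run ≤ 0 ∧ max_run ≤ 0 and a single-char token occurs; Pre_ excludes exactly that)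
def pvALoop (tokens : List String) (N min_run max_run : Int) : Nat → Int → List String → List String
  | 0, _, out => out
  | fuel + 1, i, out =>
    if i < N then
      if PySem.Str.len ((PySem.List.pyGet? tokens i).getD "") = 1 ∧
         min_run ≤ pvAInner tokens N i max_run i - i then
        pvALoop tokens N min_run max_run fuel (pvAInner tokens N i max_run i)
          (out ++ [PySem.Str.join "" (PySem.List.slice tokens (some i) (some (pvAInner tokens N i max_run i)))])
      else
        pvALoop tokens N min_run max_run fuel (i + 1) (out ++ [(PySem.List.pyGet? tokens i).getD ""])
    else out

def collapse_spelled_letters (s : String) (min_run : Int) (max_run : Int) : String :=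
  let tokens := PySem.Str.split₀ s
  PySem.Str.join " " (pvALoop tokens tokens.length min_run max_run (tokens.length + 1) 0 [])

-- ===== PORT B =====
def pvSingle (t : String) : Bool := PySem.Str.len t == 1

-- one step of B's grouping loop: extend the last group or open a new one
def pvAddTok (groups : List (Bool × List String)) (t : String) : List (Bool × List String) :=
  match groups.getLast? with
  | some (b, g) =>
      if b = pvSingle t then groups.dropLast ++ [(b, g ++ [t])]
      else groups ++ [(pvSingle t, [t])]
  | none => [(pvSingle t, [t])]

def pvGroups (tokens : List String) : List (Bool × List String) := tokens.foldl pvAddTok []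

-- B's chunk loop over one single-character group (out is the shared output list)
def pvChunks (grp : List String) (min_run max_run : Int) (out : List String) : List String :=
  (PySem.List.pyRange 0 grp.length max_run).foldl (fun out k =>
    if min_run ≤ ((PySem.List.slice grp (some k) (some (k + max_run))).length : Int) then
      out ++ [PySem.Str.join "" (PySem.List.slice grp (some k) (some (k + max_run)))]
    else out ++ PySem.List.slice grp (some k) (some (k + max_run))) out

def collapse_spelled_letters_alt (s : String) (min_run : Int) (max_run : Int) : String :=
  let tokens := PySem.Str.split₀ s
  if max_run ≤ 0 then PySem.Str.join " " tokens
  else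
    PySem.Str.join " " ((pvGroups tokens).foldl (fun out g =>
      if g.1 then pvChunks g.2 min_run max_run out else out ++ g.2) [])

-- ===== PRECONDITION & SPEC =====
-- Pre_ excludes only the inputs where Python's A never returns: with min_run ≤ 0 and
-- max_run ≤ 0 and a single-character token present, A's inner loop yields run_len = 0,
-- the collapse branch fires without advancing i, and A loops forever.
def Pre_collapse_spelled_letters (s : String) (min_run : Int) (max_run : Int) : Prop :=
  ¬ (min_run ≤ 0 ∧ max_run ≤ 0 ∧ ∃ t ∈ PySem.Str.split₀ s, PySem.Str.len t = 1)
instance (s : String) (min_run : Int) (max_run : Int) : Decidable (Pre_collapse_spelled_letters s min_run max_run) := by unfold Pre_collapse_spelled_letters; infer_instance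

def pvWitness_collapse_spelled_letters : String × Int × Int := ("g m a i l", 2, 12)

def Spec_collapse_spelled_letters (s : String) (min_run : Int) (max_run : Int) (out : String) : Prop := out = collapse_spelled_letters_alt s min_run max_run
instance (s : String) (min_run : Int) (max_run : Int) (out : String) : Decidable (Spec_collapse_spelled_letters s min_run max_run out) := by unfold Spec_collapse_spelled_letters; infer_instance

-- ===== CLAIM (what is proved, stated in full; the proofs are below) =====
def Claim_equal_collapse_spelled_letters : Prop := ∀ (s : String) (min_run : Int) (max_run : Int), Dom_collapse_spelled_letters s min_run max_run → Pre_collapse_spelled_letters s min_run max_run → Spec_collapse_spelled_letters s min_run max_run (collapse_spelled_letters s min_run max_run)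

-- ===== LEMMAS AND PROOFS =====

-- length of the maximal prefix of single-character tokens
def pvRunLen (l : List String) : Nat := (l.takeWhile pvSingle).length

-- structural specification both ports are reduced to
def pvASpec (min_run max_run : Int) : List String → List String
  | [] => []
  | t :: rest =>
    if _h : pvSingle t = true ∧
           min_run ≤ ((min max_run.toNat (pvRunLen (t :: rest)) : ℕ) : Int) ∧
           0 < min max_run.toNat (pvRunLen (t :: rest)) then
      PySem.Str.join "" ((t :: rest).take (min max_run.toNat (pvRunLen (t :: rest)))) ::
        pvASpec min_run max_run ((t :: rest).drop (min max_run.toNat (pvRunLen (t :: rest))))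
    else t :: pvASpec min_run max_run rest
termination_by l => l.length
decreasing_by
  · obtain ⟨-, -, hc⟩ := _h
    simp only [List.length_drop, List.length_cons]
    omega
  · simp

-- span-style specification of B's grouping loop
def pvGSpec : List String → List (Bool × List String)
  | [] => []
  | t :: rest =>
      (pvSingle t, t :: rest.takeWhile (fun u => pvSingle u == pvSingle t)) ::
        pvGSpec (rest.dropWhile (fun u => pvSingle u == pvSingle t))
termination_by l => l.length
decreasing_by
  simp only [List.length_cons]
  exact Nat.lt_succ_of_le (List.length_dropWhile_le _ _)

-- recursive form of B's chunking of one group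
def pvChunkSpec (min_run max_run : Int) : List String → List String
  | [] => []
  | t :: rest =>
    if _h : 0 < max_run.toNat then
      (if min_run ≤ (((t :: rest).take max_run.toNat).length : Int) then
        [PySem.Str.join "" ((t :: rest).take max_run.toNat)]
       else (t :: rest).take max_run.toNat) ++
        pvChunkSpec min_run max_run ((t :: rest).drop max_run.toNat)
    else []
termination_by l => l.length
decreasing_by
  simp only [List.length_drop, List.length_cons]
  omega

theorem pvRunLen_cons (t : String) (l : List String) :
    pvRunLen (t :: l) = if pvSingle t then pvRunLen l + 1 else 0 := by
  simp only [pvRunLen, List.takeWhile_cons]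
  split <;> simp

theorem pvAInner_spec (tokens : List String) (i max_run : Int) :
    ∀ j : Int, 0 ≤ j →
    pvAInner tokens tokens.length i max_run j
      = j + ((min (max_run - (j - i)).toNat (pvRunLen (tokens.drop j.toNat)) : Nat) : Int) := by
  intro j hj
  induction j using pvAInner.induct tokens tokens.length i max_run with
  | case1 j h ih =>
    obtain ⟨hjN, hsing, hlt⟩ := h
    have hj1 : (0:Int) ≤ j + 1 := by omega
    have hjlen : j.toNat < tokens.length := by omega
    rw [pvAInner]
    simp only [hjN, hsing, hlt, and_self, dite_true]
    rw [ih hj1]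
    have hget : (PySem.List.pyGet? tokens j).getD "" = tokens[j.toNat] := by
      rw [PySem.List.pyGet?_of_nonneg _ hj, List.getElem?_eq_getElem hjlen, Option.getD_some]
    have hs : pvSingle tokens[j.toNat] = true := by
      simp only [pvSingle, beq_iff_eq]; rw [← hget]; exact hsing
    have hdrop : tokens.drop j.toNat = tokens[j.toNat] :: tokens.drop (j.toNat + 1) :=
      List.drop_eq_getElem_cons hjlen
    have htn : (j + 1).toNat = j.toNat + 1 := by omega
    rw [htn, hdrop, pvRunLen_cons, if_pos hs]
    have hx : (max_run - (j - i)).toNat = (max_run - (j + 1 - i)).toNat + 1 := by omega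
    rw [hx, Nat.succ_min_succ]
    push_cast
    ring
  | case2 j h =>
    rw [pvAInner]
    simp only [h, dite_false]
    have hz : min (max_run - (j - i)).toNat (pvRunLen (tokens.drop j.toNat)) = 0 := by
      by_cases h1 : j < (tokens.length : Int)
      · by_cases h3 : j - i < max_run
        · have hjlen : j.toNat < tokens.length := by omega
          have hns : ¬ PySem.Str.len ((PySem.List.pyGet? tokens j).getD "") = 1 := by
            intro hc; exact h ⟨h1, hc, h3⟩
          have hget : (PySem.List.pyGet? tokens j).getD "" = tokens[j.toNat] := by
            rw [PySem.List.pyGet?_of_nonneg _ hj, List.getElem?_eq_getElem hjlen, Option.getD_some]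
          have hs : pvSingle tokens[j.toNat] = false := by
            simp only [pvSingle, beq_eq_false_iff_ne, ne_eq]; rw [← hget]; exact hns
          rw [List.drop_eq_getElem_cons hjlen, pvRunLen_cons, if_neg (by simp [hs])]
          simp
        · have : (max_run - (j - i)).toNat = 0 := by omega
          simp [this]
      · have : tokens.drop j.toNat = [] := List.drop_eq_nil_of_le (by omega)
        simp [this, pvRunLen]
    rw [hz]
    simp

theorem pvALoop_spec (tokens : List String) (min_run max_run : Int)
    (H : ¬ (min_run ≤ 0 ∧ max_run ≤ 0 ∧ ∃ t ∈ tokens, PySem.Str.len t = 1)) :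
    ∀ (fuel n : Nat) (out : List String), n ≤ tokens.length → tokens.length - n < fuel →
    pvALoop tokens tokens.length min_run max_run fuel (n : Int) out
      = out ++ pvASpec min_run max_run (tokens.drop n) := by
  intro fuel
  induction fuel with
  | zero => intro n out _ h2; exact (Nat.not_lt_zero _ h2).elim
  | succ fuel ih =>
    intro n out h1 h2
    rw [pvALoop]
    by_cases hn : n < tokens.length
    · rw [if_pos (by exact_mod_cast hn)]
      have hget : (PySem.List.pyGet? tokens (n : Int)).getD "" = tokens[n] := by
        simp [List.getElem?_eq_getElem hn]
      have hinner : pvAInner tokens tokens.length (n : Int) max_run (n : Int)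
          = (n : Int) + ((min max_run.toNat (pvRunLen (tokens.drop n)) : Nat) : Int) := by
        rw [pvAInner_spec tokens (n : Int) max_run (n : Int) (by omega)]
        have hz : (max_run - ((n:Int) - (n:Int))) = max_run := by ring
        rw [hz]
        norm_num
      set c : Nat := min max_run.toNat (pvRunLen (tokens.drop n)) with hc
      have hdrop : tokens.drop n = tokens[n] :: tokens.drop (n + 1) :=
        List.drop_eq_getElem_cons hn
      have hrun1 : pvSingle tokens[n] = true → 1 ≤ pvRunLen (tokens.drop n) := by
        intro hs; rw [hdrop, pvRunLen_cons, if_pos hs]; omega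
      by_cases hcond : PySem.Str.len ((PySem.List.pyGet? tokens (n:Int)).getD "") = 1 ∧
          min_run ≤ pvAInner tokens tokens.length (n:Int) max_run (n:Int) - (n:Int)
      · rw [if_pos hcond]
        obtain ⟨hsing, hmin⟩ := hcond
        have hs : pvSingle tokens[n] = true := by
          simp only [pvSingle, beq_iff_eq]; rw [← hget]; exact hsing
        have hminc : min_run ≤ (c : Int) := by rw [hinner] at hmin; omega
        have hcpos : 0 < c := by
          rcases Nat.eq_zero_or_pos c with h0 | h
          · exfalso
            have hmx : max_run.toNat = 0 := by
              have := hrun1 hs; omega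
            exact H ⟨by omega, by omega,
              tokens[n], List.mem_of_getElem rfl, by
                simpa only [pvSingle, beq_iff_eq] using hs⟩
          · exact h
        have hslice : PySem.List.slice tokens (some (n:Int))
            (some (pvAInner tokens tokens.length (n:Int) max_run (n:Int)))
            = (tokens.drop n).take c := by
          rw [hinner]; exact PySem.List.slice_natCast_add tokens n c
        have hclen : c ≤ tokens.length - n := by
          have h3 : pvRunLen (tokens.drop n) ≤ (tokens.drop n).length :=
            (List.takeWhile_prefix pvSingle).length_le
          simp only [List.length_drop] at h3
          omega
        have hcast : pvAInner tokens tokens.length (n:Int) max_run (n:Int) = ((n + c : Nat) : Int) := by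
          rw [hinner]; push_cast; ring
        rw [hslice, hcast, ih (n + c) _ (by omega) (by omega)]
        have hspec : pvASpec min_run max_run (tokens.drop n)
            = PySem.Str.join "" ((tokens.drop n).take c) ::
              pvASpec min_run max_run ((tokens.drop n).drop c) := by
          rw [hdrop]
          rw [pvASpec]
          rw [dif_pos ⟨hs, by rw [← hdrop, ← hc]; exact hminc, by rw [← hdrop, ← hc]; exact hcpos⟩]
          rw [← hdrop, ← hc]
        rw [hspec, List.drop_drop]
        simp
      · rw [if_neg hcond]
        have hcast1 : ((n : Int) + 1) = ((n + 1 : Nat) : Int) := by push_cast; ring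
        rw [hcast1, ih (n + 1) _ (by omega) (by omega), hget]
        have hspec : pvASpec min_run max_run (tokens.drop n)
            = tokens[n] :: pvASpec min_run max_run (tokens.drop (n + 1)) := by
          rw [hdrop, pvASpec]
          rw [dif_neg]
          intro ⟨hs, hmc, hcp⟩
          apply hcond
          constructor
          · rw [hget]; simpa only [pvSingle, beq_iff_eq] using hs
          · rw [← hdrop, ← hc] at hmc
            rw [hinner]
            omega
        rw [hspec]
        simp
    · rw [if_neg (by exact_mod_cast hn)]
      have hnl : n = tokens.length := by omega
      rw [hnl]
      simp [pvASpec]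

theorem pvAddTok_ne_nil (gs : List (Bool × List String)) (t : String) : pvAddTok gs t ≠ [] := by
  unfold pvAddTok
  cases h : gs.getLast? with
  | none => simp
  | some bg =>
    obtain ⟨b, g⟩ := bg
    by_cases hb : b = pvSingle t <;> simp [hb]

theorem pvAddTok_append (gs xs : List (Bool × List String)) (t : String) (hxs : xs ≠ []) :
    pvAddTok (gs ++ xs) t = gs ++ pvAddTok xs t := by
  unfold pvAddTok
  rw [List.getLast?_append_of_ne_nil gs hxs]
  cases h : xs.getLast? with
  | none => exact absurd (List.getLast?_eq_none_iff.mp h) hxs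
  | some bg =>
    obtain ⟨b, g⟩ := bg
    rw [List.dropLast_append_of_ne_nil hxs]
    by_cases hb : b = pvSingle t <;> simp [hb]

theorem pvFoldl_addTok_append (l : List String) :
    ∀ (gs xs : List (Bool × List String)), xs ≠ [] →
    List.foldl pvAddTok (gs ++ xs) l = gs ++ List.foldl pvAddTok xs l := by
  induction l with
  | nil => intro gs xs _; simp
  | cons t l ih =>
    intro gs xs hxs
    simp only [List.foldl_cons]
    rw [pvAddTok_append gs xs t hxs, ih gs (pvAddTok xs t) (pvAddTok_ne_nil xs t)]

theorem pvGSpec_nil : pvGSpec [] = [] := by rw [pvGSpec]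

theorem pvGSpec_cons (t : String) (rest : List String) :
    pvGSpec (t :: rest)
      = (pvSingle t, t :: rest.takeWhile (fun u => pvSingle u == pvSingle t)) ::
          pvGSpec (rest.dropWhile (fun u => pvSingle u == pvSingle t)) := by
  rw [pvGSpec]

theorem pvFoldl_single_run (l : List String) :
    ∀ (b : Bool) (g : List String),
    List.foldl pvAddTok [(b, g)] l
      = (b, g ++ l.takeWhile (fun u => pvSingle u == b)) ::
          pvGSpec (l.dropWhile (fun u => pvSingle u == b)) := by
  induction l with
  | nil => intro b g; simp [pvGSpec_nil]
  | cons t l ih =>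
    intro b g
    simp only [List.foldl_cons]
    by_cases hb : b = pvSingle t
    · have hstep : pvAddTok [(b, g)] t = [(b, g ++ [t])] := by
        unfold pvAddTok; simp [hb]
      rw [hstep, ih b (g ++ [t])]
      have hpred : (pvSingle t == b) = true := by simp [hb]
      simp [hpred]
    · have hstep : pvAddTok [(b, g)] t = [(b, g)] ++ [(pvSingle t, [t])] := by
        unfold pvAddTok; simp [hb]
      rw [hstep, pvFoldl_addTok_append l [(b, g)] [(pvSingle t, [t])] (by simp),
        ih (pvSingle t) [t]]
      have hpred : (pvSingle t == b) = false := by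
        simp only [beq_eq_false_iff_ne, ne_eq]; exact fun hc => hb hc.symm
      simp only [List.takeWhile_cons, List.dropWhile_cons, hpred, Bool.false_eq_true,
        if_false]
      rw [pvGSpec_cons]
      simp

theorem pvGroups_eq (tokens : List String) : pvGroups tokens = pvGSpec tokens := by
  cases tokens with
  | nil => simp [pvGroups, pvGSpec_nil]
  | cons t rest =>
    unfold pvGroups
    simp only [List.foldl_cons]
    have hstep : pvAddTok [] t = [(pvSingle t, [t])] := by unfold pvAddTok; simp
    rw [hstep, pvFoldl_single_run rest (pvSingle t) [t], pvGSpec_cons]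
    simp

theorem pvPyRange_pos_nil (a b s : Int) (hs : 0 < s) (hab : b ≤ a) :
    PySem.List.pyRange a b s = [] := by
  rw [PySem.List.pyRange_of_pos a b hs, if_neg (by omega)]
  simp

theorem pvPyRange_pos_cons (a b s : Int) (hs : 0 < s) (hab : a < b) :
    PySem.List.pyRange a b s = a :: PySem.List.pyRange (a + s) b s := by
  rw [PySem.List.pyRange_of_pos a b hs, PySem.List.pyRange_of_pos (a + s) b hs,
    if_pos hab]
  have hq : (b - a + s - 1) / s = (b - a - 1) / s + 1 := by
    have hnum : b - a + s - 1 = (b - a - 1) + 1 * s := by ring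
    rw [hnum, Int.add_mul_ediv_right _ _ (by omega : s ≠ 0)]
  have hqn : (b - a - 1) / s ≥ 0 := Int.ediv_nonneg (by omega) (by omega)
  have hn : ((b - a + s - 1) / s).toNat = ((b - a - 1) / s).toNat + 1 := by omega
  rw [hn, List.range_succ_eq_map, List.map_cons, List.map_map]
  by_cases hcase : a + s < b
  · rw [if_pos hcase]
    have hn2 : b - (a + s) + s - 1 = b - a - 1 := by ring
    rw [hn2]
    simp only [Nat.cast_zero, mul_zero, add_zero, List.cons.injEq, true_and]
    apply List.map_congr_left
    intro k _
    simp only [Function.comp_apply]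
    push_cast
    ring
  · rw [if_neg hcase]
    have hz : (b - a - 1) / s = 0 := by
      apply Int.ediv_eq_zero_of_lt (by omega) (by omega)
    rw [hz]
    simp

theorem pvChunkSpec_nil (min_run max_run : Int) : pvChunkSpec min_run max_run [] = [] := by
  rw [pvChunkSpec]

theorem pvChunkSpec_cons (min_run max_run : Int) (t : String) (rest : List String)
    (hmax : 0 < max_run.toNat) :
    pvChunkSpec min_run max_run (t :: rest)
      = (if min_run ≤ (((t :: rest).take max_run.toNat).length : Int) then
          [PySem.Str.join "" ((t :: rest).take max_run.toNat)]
         else (t :: rest).take max_run.toNat) ++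
          pvChunkSpec min_run max_run ((t :: rest).drop max_run.toNat) := by
  rw [pvChunkSpec, dif_pos hmax]

theorem pvChunks_aux (grp : List String) (min_run max_run : Int) (hmax : 1 ≤ max_run) :
    ∀ (fuel : Nat) (off : Nat) (out : List String), grp.length - off < fuel →
    (PySem.List.pyRange (off : Int) (grp.length : Int) max_run).foldl (fun out k =>
      if min_run ≤ ((PySem.List.slice grp (some k) (some (k + max_run))).length : Int) then
        out ++ [PySem.Str.join "" (PySem.List.slice grp (some k) (some (k + max_run)))]
      else out ++ PySem.List.slice grp (some k) (some (k + max_run))) out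
      = out ++ pvChunkSpec min_run max_run (grp.drop off) := by
  intro fuel
  induction fuel with
  | zero => intro off out h; omega
  | succ fuel ih =>
    intro off out h
    by_cases hoff : off < grp.length
    · rw [pvPyRange_pos_cons _ _ _ (by omega) (by exact_mod_cast hoff), List.foldl_cons]
      have hslice : PySem.List.slice grp (some (off : Int)) (some ((off : Int) + max_run))
          = (grp.drop off).take max_run.toNat := by
        rw [PySem.List.slice_toNat]
        · rw [show ((off : Int)).toNat = off by omega,
            show ((off : Int) + max_run).toNat - off = max_run.toNat by omega]
        · omega
        · omega
      rw [hslice]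
      rw [← apply_ite (fun z => out ++ z)]
      have hcast : (off : Int) + max_run = ((off + max_run.toNat : Nat) : Int) := by
        push_cast; omega
      rw [hcast, ih (off + max_run.toNat) _ (by omega)]
      cases hd : grp.drop off with
      | nil =>
        exfalso
        have hlen := congrArg List.length hd
        simp only [List.length_drop, List.length_nil] at hlen
        omega
      | cons hdt tl =>
        rw [pvChunkSpec_cons _ _ _ _ (by omega : 0 < max_run.toNat)]
        have hdd : (hdt :: tl).drop max_run.toNat = grp.drop (off + max_run.toNat) := by
          rw [← hd, List.drop_drop]
        rw [hdd]
        simp [List.append_assoc]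
    · rw [pvPyRange_pos_nil _ _ _ (by omega) (by exact_mod_cast (by omega : grp.length ≤ off))]
      rw [List.drop_eq_nil_of_le (by omega)]
      simp [pvChunkSpec]

theorem pvChunks_spec (grp : List String) (min_run max_run : Int) (hmax : 1 ≤ max_run)
    (out : List String) :
    pvChunks grp min_run max_run out = out ++ pvChunkSpec min_run max_run grp := by
  have := pvChunks_aux grp min_run max_run hmax (grp.length + 1) 0 out (by omega)
  simpa [pvChunks] using this

theorem pvASpec_nil (min_run max_run : Int) : pvASpec min_run max_run [] = [] := by
  rw [pvASpec]

theorem pvASpec_nonsingle_prefix (min_run max_run : Int) :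
    ∀ (u v : List String), (∀ x ∈ u, pvSingle x = false) →
    pvASpec min_run max_run (u ++ v) = u ++ pvASpec min_run max_run v := by
  intro u
  induction u with
  | nil => simp
  | cons x u ihu =>
    intro v hall
    have hx : pvSingle x = false := hall x (by simp)
    rw [List.cons_append, pvASpec]
    split
    · rename_i hcnd; rw [hx] at hcnd; simp at hcnd
    · rw [ihu v (fun y hy => hall y (by simp [hy]))]
      simp

theorem pvRunLen_append_single :
    ∀ (grp rest : List String), (∀ x ∈ grp, pvSingle x = true) → pvRunLen rest = 0 →
    pvRunLen (grp ++ rest) = grp.length := by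
  intro grp
  induction grp with
  | nil => intro rest _ hrest; simpa using hrest
  | cons t g ihg =>
    intro rest hall hrest
    rw [List.cons_append, pvRunLen_cons, if_pos (hall t (by simp)),
      ihg rest (fun y hy => hall y (by simp [hy])) hrest]
    simp

theorem pvRunLen_dropWhile (l : List String) : pvRunLen (l.dropWhile pvSingle) = 0 := by
  induction l with
  | nil => rfl
  | cons t l ihl =>
    by_cases h : pvSingle t
    · simpa [h] using ihl
    · simp [h, pvRunLen_cons]

theorem pvChunkSpec_all_fail (min_run max_run : Int) (hx : 0 < max_run.toNat) :
    ∀ (n : Nat) (grp : List String), grp.length ≤ n →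
    ¬ (min_run ≤ ((min max_run.toNat grp.length : ℕ) : Int)) →
    pvChunkSpec min_run max_run grp = grp := by
  intro n
  induction n with
  | zero =>
    intro grp hl _
    cases grp with
    | nil => exact pvChunkSpec_nil min_run max_run
    | cons t rest => simp at hl
  | succ n ihn =>
    intro grp hl hfail
    cases grp with
    | nil => exact pvChunkSpec_nil min_run max_run
    | cons t rest =>
      rw [pvChunkSpec_cons min_run max_run t rest hx]
      have hcond : ¬ (min_run ≤ ((((t :: rest).take max_run.toNat).length : Nat) : Int)) := by
        simpa [List.length_take] using hfail
      rw [if_neg hcond]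
      have hfail2 : ¬ (min_run ≤ ((min max_run.toNat ((t :: rest).drop max_run.toNat).length : ℕ) : Int)) := by
        simp only [List.length_drop, List.length_cons] at *
        push_cast at hfail ⊢
        omega
      rw [ihn _ (by simp only [List.length_drop, List.length_cons] at *; omega) hfail2,
        List.take_append_drop]

theorem pvASpec_run (min_run max_run : Int) (hmax : 1 ≤ max_run) :
    ∀ (n : Nat) (grp rest : List String), grp.length ≤ n →
    (∀ x ∈ grp, pvSingle x = true) → pvRunLen rest = 0 →
    pvASpec min_run max_run (grp ++ rest)
      = pvChunkSpec min_run max_run grp ++ pvASpec min_run max_run rest := by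
  intro n
  induction n with
  | zero =>
    intro grp rest hl _ _
    cases grp with
    | nil => simp [pvChunkSpec_nil]
    | cons t g => simp at hl
  | succ n ihn =>
    intro grp rest hl hall hrest
    cases grp with
    | nil => simp [pvChunkSpec_nil]
    | cons t g =>
      have hxt : 0 < max_run.toNat := by omega
      have hs : pvSingle t = true := hall t (by simp)
      have hrun : pvRunLen (t :: (g ++ rest)) = g.length + 1 := by
        have h0 := pvRunLen_append_single (t :: g) rest hall hrest
        simpa using h0
      have hcpos : 0 < min max_run.toNat (g.length + 1) := by omega
      have htake : ∀ m : Nat, ((t :: g) ++ rest).take (min max_run.toNat (g.length + 1))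
          = (t :: g).take (min max_run.toNat (g.length + 1)) := by
        intro _
        apply List.take_append_of_le_length
        simp only [List.length_cons]
        omega
      rw [List.cons_append, pvASpec]
      split
      · rename_i hcnd
        rw [hrun] at hcnd
        obtain ⟨-, hm, -⟩ := hcnd
        -- collapse case
        rw [hrun]
        have htk : (t :: (g ++ rest)).take (min max_run.toNat (g.length + 1))
            = (t :: g).take (min max_run.toNat (g.length + 1)) := by
          have h0 := htake 0
          simpa using h0
        have hdp : (t :: (g ++ rest)).drop (min max_run.toNat (g.length + 1))
            = (t :: g).drop (min max_run.toNat (g.length + 1)) ++ rest := by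
          have h0 : ((t :: g) ++ rest).drop (min max_run.toNat (g.length + 1))
              = (t :: g).drop (min max_run.toNat (g.length + 1)) ++ rest := by
            apply List.drop_append_of_le_length
            simp only [List.length_cons]
            omega
          simpa using h0
        rw [htk, hdp]
        rw [ihn ((t :: g).drop (min max_run.toNat (g.length + 1))) rest
          (by simp only [List.length_drop, List.length_cons] at *; omega)
          (fun y hy => hall y (List.mem_of_mem_drop hy)) hrest]
        rw [pvChunkSpec_cons min_run max_run t g hxt]
        have htk2 : (t :: g).take max_run.toNat = (t :: g).take (min max_run.toNat (g.length + 1)) := by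
          rcases Nat.le_total max_run.toNat (g.length + 1) with hle | hle
          · rw [Nat.min_eq_left hle]
          · rw [Nat.min_eq_right hle, List.take_of_length_le (by simp only [List.length_cons]; omega),
              List.take_of_length_le (by simp only [List.length_cons]; omega)]
        have hdp2 : (t :: g).drop max_run.toNat = (t :: g).drop (min max_run.toNat (g.length + 1)) := by
          rcases Nat.le_total max_run.toNat (g.length + 1) with hle | hle
          · rw [Nat.min_eq_left hle]
          · rw [Nat.min_eq_right hle, List.drop_eq_nil_of_le (by simp only [List.length_cons]; omega),
              List.drop_eq_nil_of_le (by simp only [List.length_cons]; omega)]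
        have hlen2 : (((t :: g).take max_run.toNat).length : Int)
            = ((min max_run.toNat (g.length + 1) : ℕ) : Int) := by
          simp [List.length_take]
        rw [if_pos (by rw [hlen2]; exact hm), htk2, hdp2]
        simp
      · rename_i hcnd
        -- individual-emission case
        have hm : ¬ (min_run ≤ ((min max_run.toNat (g.length + 1) : ℕ) : Int)) := by
          intro hmm
          exact hcnd ⟨hs, by rw [hrun]; exact hmm, by rw [hrun]; exact hcpos⟩
        have hcfail : pvChunkSpec min_run max_run (t :: g) = t :: g :=
          pvChunkSpec_all_fail min_run max_run hxt (t :: g).length (t :: g)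
            le_rfl (by simpa using hm)
        have hgfail : pvChunkSpec min_run max_run g = g := by
          apply pvChunkSpec_all_fail min_run max_run hxt g.length g le_rfl
          intro hmm
          push_cast at hmm hm ⊢
          omega
        rw [ihn g rest (by simp only [List.length_cons] at hl; omega)
          (fun y hy => hall y (by simp [hy])) hrest, hcfail, hgfail]
        simp

theorem pvFold_gspec (min_run max_run : Int) (hmax : 1 ≤ max_run) :
    ∀ (tokens : List String) (out : List String),
    (pvGSpec tokens).foldl (fun out g =>
        if g.1 then pvChunks g.2 min_run max_run out else out ++ g.2) out
      = out ++ pvASpec min_run max_run tokens := by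
  intro tokens
  induction tokens using pvGSpec.induct with
  | case1 => intro out; simp [pvGSpec_nil, pvASpec_nil]
  | case2 t rest ih =>
    intro out
    rw [pvGSpec_cons, List.foldl_cons]
    by_cases hs : pvSingle t = true
    · have hpred : (fun u => pvSingle u == pvSingle t) = pvSingle := by
        funext u; cases h : pvSingle u <;> simp [hs]
      rw [hpred] at ih ⊢
      simp only [hs, if_pos]
      rw [pvChunks_spec _ min_run max_run hmax, ih]
      have hsplit : t :: rest
          = (t :: rest.takeWhile pvSingle) ++ rest.dropWhile pvSingle := by
        simp [List.takeWhile_append_dropWhile]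
      conv_rhs => rw [hsplit]
      rw [pvASpec_run min_run max_run hmax (t :: rest.takeWhile pvSingle).length
        (t :: rest.takeWhile pvSingle) (rest.dropWhile pvSingle) le_rfl
        (by
          intro x hx
          rcases List.mem_cons.mp hx with hx | hx
          · rw [hx]; exact hs
          · exact List.mem_takeWhile_imp hx)
        (pvRunLen_dropWhile rest)]
      simp [List.append_assoc]
    · have hs' : pvSingle t = false := by simpa using hs
      have hpred : (fun u => pvSingle u == pvSingle t) = (fun u => !pvSingle u) := by
        funext u; cases h : pvSingle u <;> simp [hs']
      rw [hpred] at ih ⊢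
      simp only [hs', Bool.false_eq_true, if_false]
      rw [ih]
      have hsplit : t :: rest
          = (t :: rest.takeWhile (fun u => !pvSingle u)) ++ rest.dropWhile (fun u => !pvSingle u) := by
        simp [List.takeWhile_append_dropWhile]
      conv_rhs => rw [hsplit]
      rw [pvASpec_nonsingle_prefix min_run max_run
        (t :: rest.takeWhile (fun u => !pvSingle u)) (rest.dropWhile (fun u => !pvSingle u))
        (by
          intro x hx
          rcases List.mem_cons.mp hx with hx | hx
          · rw [hx]; exact hs'
          · have := List.mem_takeWhile_imp hx
            simpa using this)]
      simp [List.append_assoc]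

theorem pvASpec_id_of_max_nonpos (min_run max_run : Int) (hmax : max_run ≤ 0) :
    ∀ l : List String, pvASpec min_run max_run l = l := by
  intro l
  induction l with
  | nil => exact pvASpec_nil min_run max_run
  | cons t rest ihr =>
    rw [pvASpec]
    split
    · rename_i hcnd
      obtain ⟨-, -, hcp⟩ := hcnd
      exfalso
      have h0 : max_run.toNat = 0 := by omega
      rw [h0, Nat.zero_min] at hcp
      exact absurd hcp (lt_irrefl 0)
    · rw [ihr]

-- ===== VERDICT (by name: the statement is the Claim_ definition above) =====
theorem collapse_spelled_letters_spec : Claim_equal_collapse_spelled_letters := by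
  intro s min_run max_run _hdom hpre
  unfold Spec_collapse_spelled_letters collapse_spelled_letters collapse_spelled_letters_alt
  set tokens := PySem.Str.split₀ s with htok
  have hloop := pvALoop_spec tokens min_run max_run (by simpa [Pre_collapse_spelled_letters, htok] using hpre)
    (tokens.length + 1) 0 [] (by omega) (by omega)
  simp only [Nat.cast_zero, List.drop_zero, List.nil_append] at hloop
  by_cases hmax : max_run ≤ 0
  · simp only [if_pos hmax, hloop, pvASpec_id_of_max_nonpos min_run max_run hmax]
  · have hmax1 : 1 ≤ max_run := by omega
    simp only [if_neg hmax, hloop, pvGroups_eq, pvFold_gspec min_run max_run hmax1 tokens [],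
      List.nil_append]
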